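-- pv_equiv track=rewrite | github.com/MrBrantCode/unitest_baseline | mut_generate/mist_train_taco/taco_17281/solution.py | calculate_white_balls_after_levels
-- ===== SOURCE A (Python) =====
-- def calculate_white_balls_after_levels(n, k, m, s):
--     mod = 1000000007
--
--     def multiply(a, b):
--         mul = [[0] * 10 for _ in range(10)]
--         for i in range(10):
--             for j in range(10):
--                 for k in range(10):
--                     mul[i][j] += a[i][k] * b[k][j]
--                     mul[i][j] %= mod
--         return mul
--
--     matrix_A = [0] * 10
--     for x in s:
--         matrix_A[ord(x) - ord('0')] += 1
--
--     matrix_C = [[0] * 10 for _ in range(10)]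
--     for i in range(10):
--         for j in range(10):
--             cur = str(j * k)
--             matrix_C[i][j] += cur.count(str(i))
--
--     matrix_E = [[0] * 10 for _ in range(10)]
--     for i in range(10):
--         matrix_E[i][i] = 1
--
--     while m != 0:
--         if m % 2 == 1:
--             matrix_E = multiply(matrix_E, matrix_C)
--             m -= 1
--         matrix_C = multiply(matrix_C, matrix_C)
--         m //= 2
--
--     matrix_B = [0] * 10
--     for i in range(10):
--         for j in range(10):
--             matrix_B[i] += matrix_A[j] * matrix_E[i][j]
--             matrix_B[i] %= mod
--
--     return sum(matrix_B) % mod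
-- ===== SOURCE B (Python) =====
-- def calculate_white_balls_after_levels(n, k, m, s):
--     mod = 1000000007
--     cnt = [0] * 10
--     for x in s:
--         cnt[ord(x) - 48] += 1
--     trans = [[str(j * k).count(str(i)) for j in range(10)] for i in range(10)]
--
--     def matmul(a, b):
--         return [[sum(a[i][l] * b[l][j] for l in range(10)) % mod
--                  for j in range(10)] for i in range(10)]
--
--     def matpow(p):
--         if p == 0:
--             return [[1 if i == j else 0 for j in range(10)] for i in range(10)]
--         h = matpow(p // 2)
--         h2 = matmul(h, h)
--         return matmul(h2, trans) if p % 2 else h2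
--
--     power = matpow(m)
--     return sum(sum(power[i][j] * cnt[j] for j in range(10)) for i in range(10)) % mod
-- ===== Notes on version B (the rewrite author's own statement) =====
-- stated objective: alternative
-- what changed: A computes the digit-transition matrix power bottom-up in a while loop, repeatedly squaring the base and multiplying into an identity accumulator with per-term in-place mod updates, then applies the count vector with another accumulator loop; B computes the same power by top-down recursion on m (square the recursive half-power, times the base when m is odd) with comprehension-style row-times-column sums reduced once per entry, and applies the vector in a single nested sum.
import Mathlib
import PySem

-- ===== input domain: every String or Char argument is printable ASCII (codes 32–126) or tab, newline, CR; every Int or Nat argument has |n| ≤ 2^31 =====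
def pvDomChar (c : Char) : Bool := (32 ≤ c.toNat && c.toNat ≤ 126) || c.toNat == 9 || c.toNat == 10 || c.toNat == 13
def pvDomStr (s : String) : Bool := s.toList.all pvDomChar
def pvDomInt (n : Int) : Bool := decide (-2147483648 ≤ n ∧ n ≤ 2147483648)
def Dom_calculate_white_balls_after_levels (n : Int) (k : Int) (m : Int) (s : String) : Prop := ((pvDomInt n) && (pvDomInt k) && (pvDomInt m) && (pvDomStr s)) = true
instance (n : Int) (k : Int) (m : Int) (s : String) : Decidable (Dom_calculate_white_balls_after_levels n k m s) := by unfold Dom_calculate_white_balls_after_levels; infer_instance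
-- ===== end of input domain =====

-- B computes the same digit-transition matrix power by top-down recursion on m (halving,
-- squaring the recursive result) with comprehension-style row×column products, instead of A's
-- bottom-up while loop that squares the base and multiplies into an identity accumulator with
-- per-term mod updates; the vector is applied in one nested sum (objective: alternative).

-- ===== PORT A =====
-- helpers shared by both ports (both Pythons contain the identical digit-count loop):
-- a[i][j] (both indices nonnegative here; pvCount also feeds negative indices, which
-- pyGetD/pySetD resolve with Python's negative-index rule, exact on -len ≤ i < len)
def pvGet2 (a : List (List Int)) (i j : Int) : Int :=
  PySem.List.pyGetD (PySem.List.pyGetD a i []) j 0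

def pvSet2 (a : List (List Int)) (i j : Int) (v : Int) : List (List Int) :=
  PySem.List.pySetD a i (PySem.List.pySetD (PySem.List.pyGetD a i []) j v)

-- matrix_A = [0]*10; for x in s: matrix_A[ord(x)-ord('0')] += 1   (identical in A and B)
def pvCount (s : String) : List Int :=
  s.toList.foldl
    (fun arr x =>
      PySem.List.pySetD arr ((x.toNat : Int) - 48)
        (PySem.List.pyGetD arr ((x.toNat : Int) - 48) 0 + 1))
    (List.replicate 10 0)

-- def multiply(a, b) of A, with mul[i][j] += …; mul[i][j] %= mod fused into one cell write
def pvMultiply (a b : List (List Int)) : List (List Int) :=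
  (PySem.List.pyRange 0 10).foldl
    (fun mul i =>
      (PySem.List.pyRange 0 10).foldl
        (fun mul j =>
          (PySem.List.pyRange 0 10).foldl
            (fun mul kk =>
              pvSet2 mul i j
                (PySem.Int.mod (pvGet2 mul i j + pvGet2 a i kk * pvGet2 b kk j) 1000000007))
            mul)
        mul)
    (List.replicate 10 (List.replicate 10 0))

-- matrix_C of A: matrix_C[i][j] += str(j*k).count(str(i))
def pvMatC (k : Int) : List (List Int) :=
  (PySem.List.pyRange 0 10).foldl
    (fun c i =>
      (PySem.List.pyRange 0 10).foldl
        (fun c j =>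
          pvSet2 c i j
            (pvGet2 c i j + (PySem.Str.count (PySem.Int.toStr (j * k)) (PySem.Int.toStr i) : Int)))
        c)
    (List.replicate 10 (List.replicate 10 0))

-- matrix_E of A: identity
def pvMatE : List (List Int) :=
  (PySem.List.pyRange 0 10).foldl (fun e i => pvSet2 e i i 1)
    (List.replicate 10 (List.replicate 10 0))

-- A's 'while m != 0' square-and-multiply loop; the fuel only makes the loop total
-- (for 0 ≤ m < fuel it never runs out, proved in pvPowLoop_toM below)
def pvPowLoop : Nat → Int → List (List Int) → List (List Int) → List (List Int)
  | 0, _, e, _ => e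
  | f + 1, m, e, c =>
    if m = 0 then e
    else if PySem.Int.mod m 2 = 1 then
      pvPowLoop f (PySem.Int.floordiv (m - 1) 2) (pvMultiply e c) (pvMultiply c c)
    else
      pvPowLoop f (PySem.Int.floordiv m 2) e (pvMultiply c c)

-- matrix_B of A: matrix_B[i] += matrix_A[j] * matrix_E[i][j]; matrix_B[i] %= mod (fused)
def pvMatB (a : List Int) (e : List (List Int)) : List Int :=
  (PySem.List.pyRange 0 10).foldl
    (fun b i =>
      (PySem.List.pyRange 0 10).foldl
        (fun b j =>
          PySem.List.pySetD b i
            (PySem.Int.mod (PySem.List.pyGetD b i 0 + PySem.List.pyGetD a j 0 * pvGet2 e i j)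
              1000000007))
        b)
    (List.replicate 10 0)

def calculate_white_balls_after_levels (n : Int) (k : Int) (m : Int) (s : String) : Int :=
  let matrixA := pvCount s
  let matrixC := pvMatC k
  let matrixE := pvPowLoop (m.toNat + 1) m pvMatE matrixC
  let matrixB := pvMatB matrixA matrixE
  PySem.Int.mod matrixB.sum 1000000007

-- ===== PORT B =====
-- trans = [[str(j*k).count(str(i)) for j in range(10)] for i in range(10)]
def pvTrans (k : Int) : List (List Int) :=
  (PySem.List.pyRange 0 10).map
    (fun i =>
      (PySem.List.pyRange 0 10).map
        (fun j => (PySem.Str.count (PySem.Int.toStr (j * k)) (PySem.Int.toStr i) : Int)))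

-- def matmul(a, b): [[sum(a[i][l]*b[l][j] for l in range(10)) % mod for j …] for i …]
def pvMatmulB (a b : List (List Int)) : List (List Int) :=
  (PySem.List.pyRange 0 10).map
    (fun i =>
      (PySem.List.pyRange 0 10).map
        (fun j =>
          PySem.Int.mod
            (((PySem.List.pyRange 0 10).map (fun l => pvGet2 a i l * pvGet2 b l j)).sum)
            1000000007))

-- def matpow(p): recursion on p // 2; the fuel only makes the recursion total
-- (for 0 ≤ p < fuel it never runs out, proved in pvMatpowB_toM below)
def pvMatpowB (t : List (List Int)) : Nat → Int → List (List Int)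
  | 0, _ => []
  | f + 1, p =>
    if p = 0 then
      (PySem.List.pyRange 0 10).map
        (fun i => (PySem.List.pyRange 0 10).map (fun j => if i = j then (1 : Int) else 0))
    else
      let h := pvMatpowB t f (PySem.Int.floordiv p 2)
      let h2 := pvMatmulB h h
      if PySem.Int.mod p 2 ≠ 0 then pvMatmulB h2 t else h2

def calculate_white_balls_after_levels_alt (n : Int) (k : Int) (m : Int) (s : String) : Int :=
  let cnt := pvCount s
  let trans := pvTrans k
  let power := pvMatpowB trans (m.toNat + 1) m
  PySem.Int.mod
    (((PySem.List.pyRange 0 10).map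
        (fun i =>
          ((PySem.List.pyRange 0 10).map (fun j => pvGet2 power i j * PySem.List.pyGetD cnt j 0)).sum)).sum)
    1000000007

-- ===== PRECONDITION & SPEC =====
-- Pre_ excludes m < 0, on which A's 'while m != 0' loop never terminates, and strings with a
-- character of code outside [38, 57], on which matrix_A[ord(x)-48] raises IndexError in A
-- (codes 38..47 give negative in-range indices, on which Python wraps and A returns: kept inside Pre_).
def Pre_calculate_white_balls_after_levels (n : Int) (k : Int) (m : Int) (s : String) : Prop :=
  0 ≤ m ∧ s.toList.all (fun c => 38 ≤ c.toNat && c.toNat ≤ 57) = true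

instance (n : Int) (k : Int) (m : Int) (s : String) :
    Decidable (Pre_calculate_white_balls_after_levels n k m s) := by
  unfold Pre_calculate_white_balls_after_levels; infer_instance

def pvWitness_calculate_white_balls_after_levels : Int × Int × Int × String := (1, 2, 3, "0123")

def Spec_calculate_white_balls_after_levels (n : Int) (k : Int) (m : Int) (s : String) (out : Int) : Prop := out = calculate_white_balls_after_levels_alt n k m s
instance (n : Int) (k : Int) (m : Int) (s : String) (out : Int) : Decidable (Spec_calculate_white_balls_after_levels n k m s out) := by unfold Spec_calculate_white_balls_after_levels; infer_instance

-- ===== CLAIM (what is proved, stated in full; the proofs are below) =====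
def Claim_equal_calculate_white_balls_after_levels : Prop := ∀ (n : Int) (k : Int) (m : Int) (s : String), Dom_calculate_white_balls_after_levels n k m s → Pre_calculate_white_balls_after_levels n k m s → Spec_calculate_white_balls_after_levels n k m s (calculate_white_balls_after_levels n k m s)

-- ===== LEMMAS AND PROOFS =====

-- both ports are read through 10×10 matrices / 10-vectors over ZMod 1000000007
def pvToM (a : List (List Int)) : Matrix (Fin 10) (Fin 10) (ZMod 1000000007) :=
  fun i j => ((pvGet2 a (i.val : Int) (j.val : Int) : Int) : ZMod 1000000007)

def pvToV (v : List Int) : Fin 10 → ZMod 1000000007 :=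
  fun i => ((PySem.List.pyGetD v (i.val : Int) 0 : Int) : ZMod 1000000007)

theorem pv_range10 : PySem.List.pyRange 0 10 = [0, 1, 2, 3, 4, 5, 6, 7, 8, 9] := by decide

-- a fold whose every step writes cell i (computed from the current cell value) is one write
theorem pv_foldl_cell {β ι : Type} (d : β) (l : List ι) (F : List β → ι → List β) (i : Nat)
    (f : β → ι → β) :
    ∀ (v : List β), i < v.length →
      (∀ w, w.length = v.length → ∀ x ∈ l, F w x = w.set i (f (w.getD i d) x)) →
      l.foldl F v = v.set i (l.foldl f (v.getD i d)) := by
  induction l with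
  | nil =>
    intro v hi _
    simp only [List.foldl_nil]
    apply List.ext_getElem (by simp)
    intro q hq1 hq2
    by_cases hqi : q = i
    · subst hqi
      rw [List.getElem_set_self, List.getD_eq_getElem _ _ hi]
    · rw [List.getElem_set_ne (by omega)]
  | cons x l ih =>
    intro v hi hF
    simp only [List.foldl_cons]
    rw [hF v rfl x (by simp)]
    rw [ih (v.set i (f (v.getD i d) x)) (by simpa using hi)
        (by intro w hw y hy; exact hF w (by simpa using hw) y (List.mem_cons_of_mem _ hy))]
    rw [List.set_set]
    congr 1
    rw [List.getD_eq_getElem _ _ (by simpa using hi), List.getElem_set_self,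
      List.getD_eq_getElem _ _ hi]

theorem pv_getD_set_ne {β : Type} (v : List β) (i q : Nat) (x : β) (d : β) (h : i ≠ q) :
    (v.set i x).getD q d = v.getD q d := by
  by_cases hq : q < v.length
  · rw [List.getD_eq_getElem _ _ (by simpa using hq), List.getElem_set_ne (by omega),
      List.getD_eq_getElem _ _ hq]
  · rw [List.getD_eq_default _ _ (by simpa using Nat.le_of_not_lt hq),
      List.getD_eq_default _ _ (by omega)]

theorem pv_foldl_untouched {β ι : Type} (d : β) (l : List ι) (F : List β → ι → List β) (q : Nat) :
    ∀ (v : List β),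
      (∀ w, w.length = v.length → ∀ x ∈ l,
        (F w x).length = w.length ∧ (F w x).getD q d = w.getD q d) →
      (l.foldl F v).length = v.length ∧ (l.foldl F v).getD q d = v.getD q d := by
  induction l with
  | nil => intro v _; exact ⟨rfl, rfl⟩
  | cons x l ih =>
    intro v hF
    simp only [List.foldl_cons]
    have h1 := hF v rfl x (by simp)
    have := ih (F v x) (by
      intro w hw y hy
      exact hF w (by rw [hw, h1.1]) y (List.mem_cons_of_mem _ hy))
    exact ⟨by rw [this.1, h1.1], by rw [this.2, h1.2]⟩

-- a fold writing pairwise-distinct cells, each from its own current value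
theorem pv_foldl_cells {β ι : Type} (d : β) (l : List ι) (pos : ι → Nat)
    (F : List β → ι → List β) (g : ι → β → β) :
    ∀ (v : List β), (l.map pos).Nodup →
      (∀ w, w.length = v.length → ∀ x ∈ l, F w x = w.set (pos x) (g x (w.getD (pos x) d))) →
      (l.foldl F v).length = v.length ∧
      (∀ x₀ ∈ l, pos x₀ < v.length →
        (l.foldl F v).getD (pos x₀) d = g x₀ (v.getD (pos x₀) d)) := by
  induction l with
  | nil => intro v _ _; exact ⟨rfl, by intro x hx; simp at hx⟩
  | cons x l ih =>
    intro v hn hF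
    simp only [List.map_cons, List.nodup_cons] at hn
    obtain ⟨hx_notin, hn'⟩ := hn
    simp only [List.foldl_cons]
    rw [hF v rfl x (by simp)]
    set v' := v.set (pos x) (g x (v.getD (pos x) d)) with hv'
    have hlen' : v'.length = v.length := by simp [hv']
    have hF' : ∀ w, w.length = v'.length → ∀ y ∈ l,
        F w y = w.set (pos y) (g y (w.getD (pos y) d)) := by
      intro w hw y hy
      exact hF w (by rw [hw, hlen']) y (List.mem_cons_of_mem _ hy)
    have ihres := ih v' hn' hF'
    refine ⟨by rw [ihres.1, hlen'], ?_⟩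
    intro x₀ hx₀ hpos
    rcases List.mem_cons.mp hx₀ with h | h
    · subst h
      have huntouched := pv_foldl_untouched d l F (pos x₀) v' (by
        intro w hw y hy
        rw [hF' w hw y hy]
        constructor
        · simp
        · exact pv_getD_set_ne _ _ _ _ _ (by
            intro heq; exact hx_notin (heq ▸ List.mem_map_of_mem hy)))
      rw [huntouched.2, hv', List.getD_eq_getElem _ _ (by simpa using hpos),
        List.getElem_set_self, List.getD_eq_getElem _ _ hpos]
    · have hne : pos x ≠ pos x₀ := by
        intro heq; exact hx_notin (heq ▸ List.mem_map_of_mem h)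
      rw [ihres.2 x₀ h (by rw [hlen']; exact hpos)]
      congr 1
      rw [hv']
      exact pv_getD_set_ne _ _ _ _ _ hne

theorem pv_castmod (a : Int) :
    ((PySem.Int.mod a 1000000007 : Int) : ZMod 1000000007) = (a : ZMod 1000000007) := by
  rw [PySem.Int.mod_eq_emod_of_pos (by norm_num)]
  have : a % (1000000007 : Int) ≡ a [ZMOD ((1000000007 : Nat) : Int)] :=
    Int.emod_emod_of_dvd a dvd_rfl
  exact_mod_cast (ZMod.intCast_eq_intCast_iff _ _ _).mpr (by exact_mod_cast this)

theorem pv_cast_foldl_mod (l : List Int) (f : Int → Int) :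
    ∀ (a : Int),
      ((l.foldl (fun acc x => PySem.Int.mod (acc + f x) 1000000007) a : Int) : ZMod 1000000007)
        = (a : ZMod 1000000007) + (l.map (fun x => ((f x : Int) : ZMod 1000000007))).sum := by
  induction l with
  | nil => intro a; simp
  | cons x l ih =>
    intro a
    simp only [List.foldl_cons, List.map_cons, List.sum_cons]
    rw [ih, pv_castmod]
    push_cast
    ring

theorem pv_sum_map_range10 (f : Int → ZMod 1000000007) :
    ((PySem.List.pyRange 0 10).map f).sum = ∑ i : Fin 10, f (i.val : Int) := by
  rw [pv_range10]
  simp [Fin.sum_univ_succ]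

theorem pvMultiply_get (a b : List (List Int)) (i j : Int) (hi0 : 0 ≤ i) (hi : i < 10)
    (hj0 : 0 ≤ j) (hj : j < 10) :
    pvGet2 (pvMultiply a b) i j =
      (PySem.List.pyRange 0 10).foldl
        (fun acc kk => PySem.Int.mod (acc + pvGet2 a i kk * pvGet2 b kk j) 1000000007) 0 := by
  have hnodup : ((PySem.List.pyRange 0 10).map Int.toNat).Nodup := by
    rw [pv_range10]; decide
  have hmem : ∀ x : Int, x ∈ PySem.List.pyRange 0 10 ↔ 0 ≤ x ∧ x < 10 := by
    intro x; exact PySem.List.mem_pyRange_one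
  -- outer loop over i: each iteration rewrites row ii only, from its current value
  have hcells := pv_foldl_cells ([] : List Int) (PySem.List.pyRange 0 10) Int.toNat
    (fun mul ii =>
      (PySem.List.pyRange 0 10).foldl
        (fun mul jj =>
          (PySem.List.pyRange 0 10).foldl
            (fun mul kk =>
              pvSet2 mul ii jj
                (PySem.Int.mod (pvGet2 mul ii jj + pvGet2 a ii kk * pvGet2 b kk jj) 1000000007))
            mul)
        mul)
    (fun ii row =>
      (PySem.List.pyRange 0 10).foldl
        (fun row jj =>
          (PySem.List.pyRange 0 10).foldl
            (fun row kk =>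
              row.set jj.toNat
                (PySem.Int.mod (row.getD jj.toNat 0 + pvGet2 a ii kk * pvGet2 b kk jj)
                  1000000007))
            row)
        row)
    (List.replicate 10 (List.replicate 10 0)) hnodup (by
    intro w hw ii hii
    obtain ⟨hii0, hii10⟩ := (hmem ii).mp hii
    have hiin : ii.toNat < w.length := by rw [hw]; simp; omega
    apply pv_foldl_cell ([] : List Int) _ _ ii.toNat _ w hiin
    intro w' hw' jj hjj
    obtain ⟨hjj0, hjj10⟩ := (hmem jj).mp hjj
    apply pv_foldl_cell ([] : List Int) _ _ ii.toNat _ w' (by rw [hw']; exact hiin)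
    intro w'' hw'' kk hkk
    simp only [pvSet2, pvGet2,
      PySem.List.pySetD_of_nonneg _ _ hii0, PySem.List.pySetD_of_nonneg _ _ hjj0,
      PySem.List.pyGetD_of_nonneg _ _ hii0, PySem.List.pyGetD_of_nonneg _ _ hjj0])
  -- read off row i, then cell j of the row-level fold
  have hrow := hcells.2 i ((hmem i).mpr ⟨hi0, hi⟩) (by simp; omega)
  have hrow0 : (List.replicate 10 (List.replicate 10 (0:Int))).getD i.toNat []
      = List.replicate 10 (0:Int) := by
    rw [List.getD_eq_getElem _ _ (by simp; omega), List.getElem_replicate]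
  rw [hrow0] at hrow
  have hrcells := pv_foldl_cells (0 : Int) (PySem.List.pyRange 0 10) Int.toNat
    (fun row jj =>
      (PySem.List.pyRange 0 10).foldl
        (fun row kk =>
          row.set jj.toNat
            (PySem.Int.mod (row.getD jj.toNat 0 + pvGet2 a i kk * pvGet2 b kk jj) 1000000007))
        row)
    (fun jj cell =>
      (PySem.List.pyRange 0 10).foldl
        (fun acc kk => PySem.Int.mod (acc + pvGet2 a i kk * pvGet2 b kk jj) 1000000007) cell)
    (List.replicate 10 (0:Int)) hnodup (by
    intro row hlen jj hjj
    obtain ⟨hjj0, hjj10⟩ := (hmem jj).mp hjj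
    apply pv_foldl_cell (0 : Int) _ _ jj.toNat _ row (by rw [hlen]; simp; omega)
    intro w' hw' kk hkk
    rfl)
  have hcell := hrcells.2 j ((hmem j).mpr ⟨hj0, hj⟩) (by simp; omega)
  have hcell0 : (List.replicate 10 (0:Int)).getD j.toNat 0 = 0 := by
    rw [List.getD_eq_getElem _ _ (by simp; omega), List.getElem_replicate]
  rw [hcell0] at hcell
  show PySem.List.pyGetD (PySem.List.pyGetD (pvMultiply a b) i []) j 0 = _
  rw [PySem.List.pyGetD_of_nonneg _ _ hi0, PySem.List.pyGetD_of_nonneg _ _ hj0]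
  unfold pvMultiply
  rw [hrow, hcell]

theorem pvToM_multiply (a b : List (List Int)) :
    pvToM (pvMultiply a b) = pvToM a * pvToM b := by
  ext i j
  rw [Matrix.mul_apply]
  show ((pvGet2 (pvMultiply a b) (i.val : Int) (j.val : Int) : Int) : ZMod 1000000007) = _
  rw [pvMultiply_get a b _ _ (by positivity) (by exact_mod_cast i.isLt) (by positivity)
      (by exact_mod_cast j.isLt)]
  rw [pv_cast_foldl_mod (PySem.List.pyRange 0 10)
      (fun kk => pvGet2 a (i.val : Int) kk * pvGet2 b kk (j.val : Int)) 0]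
  simp only [Int.cast_zero, zero_add]
  rw [pv_sum_map_range10]
  refine Finset.sum_congr rfl (fun kk _ => ?_)
  push_cast
  rfl

theorem pvMatC_get (k i j : Int) (hi0 : 0 ≤ i) (hi : i < 10) (hj0 : 0 ≤ j) (hj : j < 10) :
    pvGet2 (pvMatC k) i j =
      0 + (PySem.Str.count (PySem.Int.toStr (j * k)) (PySem.Int.toStr i) : Int) := by
  have hnodup : ((PySem.List.pyRange 0 10).map Int.toNat).Nodup := by
    rw [pv_range10]; decide
  have hmem : ∀ x : Int, x ∈ PySem.List.pyRange 0 10 ↔ 0 ≤ x ∧ x < 10 := by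
    intro x; exact PySem.List.mem_pyRange_one
  have hcells := pv_foldl_cells ([] : List Int) (PySem.List.pyRange 0 10) Int.toNat
    (fun c ii =>
      (PySem.List.pyRange 0 10).foldl
        (fun c jj =>
          pvSet2 c ii jj
            (pvGet2 c ii jj
              + (PySem.Str.count (PySem.Int.toStr (jj * k)) (PySem.Int.toStr ii) : Int)))
        c)
    (fun ii row =>
      (PySem.List.pyRange 0 10).foldl
        (fun row jj =>
          row.set jj.toNat
            (row.getD jj.toNat 0
              + (PySem.Str.count (PySem.Int.toStr (jj * k)) (PySem.Int.toStr ii) : Int)))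
        row)
    (List.replicate 10 (List.replicate 10 0)) hnodup (by
    intro w hw ii hii
    obtain ⟨hii0, hii10⟩ := (hmem ii).mp hii
    have hiin : ii.toNat < w.length := by rw [hw]; simp; omega
    apply pv_foldl_cell ([] : List Int) _ _ ii.toNat _ w hiin
    intro w' hw' jj hjj
    obtain ⟨hjj0, hjj10⟩ := (hmem jj).mp hjj
    simp only [pvSet2, pvGet2,
      PySem.List.pySetD_of_nonneg _ _ hii0, PySem.List.pySetD_of_nonneg _ _ hjj0,
      PySem.List.pyGetD_of_nonneg _ _ hii0, PySem.List.pyGetD_of_nonneg _ _ hjj0])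
  have hrow := hcells.2 i ((hmem i).mpr ⟨hi0, hi⟩) (by simp; omega)
  have hrow0 : (List.replicate 10 (List.replicate 10 (0:Int))).getD i.toNat []
      = List.replicate 10 (0:Int) := by
    rw [List.getD_eq_getElem _ _ (by simp; omega), List.getElem_replicate]
  rw [hrow0] at hrow
  have hrcells := pv_foldl_cells (0 : Int) (PySem.List.pyRange 0 10) Int.toNat
    (fun row jj =>
      row.set jj.toNat
        (row.getD jj.toNat 0
          + (PySem.Str.count (PySem.Int.toStr (jj * k)) (PySem.Int.toStr i) : Int)))
    (fun jj cell =>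
      cell + (PySem.Str.count (PySem.Int.toStr (jj * k)) (PySem.Int.toStr i) : Int))
    (List.replicate 10 (0:Int)) hnodup (by intro row hlen jj hjj; rfl)
  have hcell := hrcells.2 j ((hmem j).mpr ⟨hj0, hj⟩) (by simp; omega)
  have hcell0 : (List.replicate 10 (0:Int)).getD j.toNat 0 = 0 := by
    rw [List.getD_eq_getElem _ _ (by simp; omega), List.getElem_replicate]
  rw [hcell0] at hcell
  show PySem.List.pyGetD (PySem.List.pyGetD (pvMatC k) i []) j 0 = _
  rw [PySem.List.pyGetD_of_nonneg _ _ hi0, PySem.List.pyGetD_of_nonneg _ _ hj0]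
  unfold pvMatC
  rw [hrow, hcell]

theorem pvTrans_get (k i j : Int) (hi0 : 0 ≤ i) (hi : i < 10) (hj0 : 0 ≤ j) (hj : j < 10) :
    pvGet2 (pvTrans k) i j =
      (PySem.Str.count (PySem.Int.toStr (j * k)) (PySem.Int.toStr i) : Int) := by
  unfold pvTrans pvGet2
  rw [PySem.List.pyGetD_map_pyRange_of_nonneg _ 10 _ _ hi0 hi,
    PySem.List.pyGetD_map_pyRange_of_nonneg _ 10 _ _ hj0 hj]

theorem pvToM_matC_eq_trans (k : Int) : pvToM (pvMatC k) = pvToM (pvTrans k) := by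
  ext i j
  unfold pvToM
  rw [pvMatC_get k _ _ (by positivity) (by exact_mod_cast i.isLt) (by positivity)
      (by exact_mod_cast j.isLt),
    pvTrans_get k _ _ (by positivity) (by exact_mod_cast i.isLt) (by positivity)
      (by exact_mod_cast j.isLt), zero_add]

theorem pvToM_matE : pvToM pvMatE = 1 := by
  have h : pvMatE = [[1,0,0,0,0,0,0,0,0,0],[0,1,0,0,0,0,0,0,0,0],[0,0,1,0,0,0,0,0,0,0],
      [0,0,0,1,0,0,0,0,0,0],[0,0,0,0,1,0,0,0,0,0],[0,0,0,0,0,1,0,0,0,0],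
      [0,0,0,0,0,0,1,0,0,0],[0,0,0,0,0,0,0,1,0,0],[0,0,0,0,0,0,0,0,1,0],
      [0,0,0,0,0,0,0,0,0,1]] := by decide
  ext i j
  rw [Matrix.one_apply]
  fin_cases i <;> fin_cases j <;> simp [pvToM, pvGet2, h, PySem.List.pyGetD]

theorem pvPowLoop_toM :
    ∀ (fuel : Nat) (m : Int) (e c : List (List Int)), 0 ≤ m → m < (fuel : Int) →
      pvToM (pvPowLoop fuel m e c) = pvToM e * pvToM c ^ m.toNat := by
  intro fuel
  induction fuel with
  | zero =>
    intro m e c hm hlt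
    exfalso
    simp only [Nat.cast_zero] at hlt
    omega
  | succ f ih =>
    intro m e c hm hlt
    by_cases h0 : m = 0
    · subst h0
      simp [pvPowLoop]
    · have hmod : PySem.Int.mod m 2 = m % 2 := PySem.Int.mod_eq_emod_of_pos (by norm_num)
      by_cases hodd : PySem.Int.mod m 2 = 1
      · have hstep : pvPowLoop (f + 1) m e c =
            pvPowLoop f (PySem.Int.floordiv (m - 1) 2) (pvMultiply e c) (pvMultiply c c) := by
          show (if m = 0 then e else if PySem.Int.mod m 2 = 1 then _ else _) = _
          rw [if_neg h0, if_pos hodd]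
        have hfd : PySem.Int.floordiv (m - 1) 2 = (m - 1) / 2 :=
          PySem.Int.floordiv_eq_ediv_of_pos (by norm_num)
        rw [hmod] at hodd
        have h1 : 0 ≤ (m - 1) / 2 := by omega
        have h2 : (m - 1) / 2 < (f : Int) := by
          simp only [Nat.cast_add, Nat.cast_one] at hlt; omega
        have h3 : m.toNat = 2 * ((m - 1) / 2).toNat + 1 := by omega
        rw [hstep, hfd, ih _ _ _ h1 h2, pvToM_multiply, pvToM_multiply, h3]
        rw [show pvToM c * pvToM c = pvToM c ^ 2 from (sq (pvToM c)).symm]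
        rw [← pow_mul, mul_assoc, ← pow_succ']
      · have hstep : pvPowLoop (f + 1) m e c =
            pvPowLoop f (PySem.Int.floordiv m 2) e (pvMultiply c c) := by
          show (if m = 0 then e else if PySem.Int.mod m 2 = 1 then _ else _) = _
          rw [if_neg h0, if_neg hodd]
        have hfd : PySem.Int.floordiv m 2 = m / 2 :=
          PySem.Int.floordiv_eq_ediv_of_pos (by norm_num)
        rw [hmod] at hodd
        have h1 : 0 ≤ m / 2 := by omega
        have h2 : m / 2 < (f : Int) := by
          simp only [Nat.cast_add, Nat.cast_one] at hlt; omega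
        have h3 : m.toNat = 2 * (m / 2).toNat := by omega
        rw [hstep, hfd, ih _ _ _ h1 h2, pvToM_multiply, h3]
        rw [show pvToM c * pvToM c = pvToM c ^ 2 from (sq (pvToM c)).symm]
        rw [← pow_mul]

theorem pv_foldl_len {β ι : Type} (l : List ι) (F : List β → ι → List β)
    (h : ∀ w x, (F w x).length = w.length) :
    ∀ v : List β, (l.foldl F v).length = v.length := by
  induction l with
  | nil => intro v; rfl
  | cons x l ih => intro v; rw [List.foldl_cons, ih, h]

theorem pvMatmulB_get (a b : List (List Int)) (i j : Int) (hi0 : 0 ≤ i) (hi : i < 10)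
    (hj0 : 0 ≤ j) (hj : j < 10) :
    pvGet2 (pvMatmulB a b) i j =
      PySem.Int.mod (((PySem.List.pyRange 0 10).map (fun l => pvGet2 a i l * pvGet2 b l j)).sum)
        1000000007 := by
  unfold pvMatmulB pvGet2
  rw [PySem.List.pyGetD_map_pyRange_of_nonneg _ 10 _ _ hi0 hi,
    PySem.List.pyGetD_map_pyRange_of_nonneg _ 10 _ _ hj0 hj]

theorem pvMatmulB_toM (a b : List (List Int)) :
    pvToM (pvMatmulB a b) = pvToM a * pvToM b := by
  ext i j
  rw [Matrix.mul_apply]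
  show ((pvGet2 (pvMatmulB a b) (i.val : Int) (j.val : Int) : Int) : ZMod 1000000007) = _
  rw [pvMatmulB_get a b _ _ (by positivity) (by exact_mod_cast i.isLt) (by positivity)
      (by exact_mod_cast j.isLt)]
  rw [pv_castmod, Int.cast_list_sum, List.map_map]
  rw [show (Int.cast ∘ fun l => pvGet2 a (i.val : Int) l * pvGet2 b l (j.val : Int))
      = (fun l => ((pvGet2 a (i.val : Int) l * pvGet2 b l (j.val : Int) : Int)
          : ZMod 1000000007)) from rfl]
  rw [pv_sum_map_range10]
  refine Finset.sum_congr rfl (fun l _ => ?_)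
  push_cast
  rfl

theorem pvMatpowB_zero_toM (t : List (List Int)) (f : Nat) :
    pvToM (pvMatpowB t (f + 1) 0) = 1 := by
  ext i j
  show ((pvGet2 (pvMatpowB t (f + 1) 0) (i.val : Int) (j.val : Int) : Int) : ZMod 1000000007) = _
  rw [show pvMatpowB t (f + 1) 0 =
      (PySem.List.pyRange 0 10).map
        (fun i => (PySem.List.pyRange 0 10).map (fun j => if i = j then (1 : Int) else 0))
    from by unfold pvMatpowB; rw [if_pos rfl]]
  unfold pvGet2
  rw [PySem.List.pyGetD_map_pyRange_of_nonneg _ 10 _ _ (by positivity)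
      (by exact_mod_cast i.isLt),
    PySem.List.pyGetD_map_pyRange_of_nonneg _ 10 _ _ (by positivity)
      (by exact_mod_cast j.isLt)]
  rw [Matrix.one_apply]
  rcases eq_or_ne i j with h | h
  · subst h; simp
  · rw [if_neg (by exact_mod_cast (fun hc => h (Fin.ext (by exact_mod_cast hc)))), if_neg h]
    simp

theorem pvMatpowB_toM :
    ∀ (fuel : Nat) (p : Int) (t : List (List Int)), 0 ≤ p → p < (fuel : Int) →
      pvToM (pvMatpowB t fuel p) = pvToM t ^ p.toNat := by
  intro fuel
  induction fuel with
  | zero =>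
    intro p t hp hlt
    exfalso
    simp only [Nat.cast_zero] at hlt
    omega
  | succ f ih =>
    intro p t hp hlt
    by_cases h0 : p = 0
    · subst h0
      rw [pvMatpowB_zero_toM]
      simp
    · have hstep : pvMatpowB t (f + 1) p =
          (if PySem.Int.mod p 2 ≠ 0 then
            pvMatmulB (pvMatmulB (pvMatpowB t f (PySem.Int.floordiv p 2))
              (pvMatpowB t f (PySem.Int.floordiv p 2))) t
          else
            pvMatmulB (pvMatpowB t f (PySem.Int.floordiv p 2))
              (pvMatpowB t f (PySem.Int.floordiv p 2))) := by
        show (if p = 0 then _ else _) = _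
        rw [if_neg h0]
      have hfd : PySem.Int.floordiv p 2 = p / 2 :=
        PySem.Int.floordiv_eq_ediv_of_pos (by norm_num)
      have hmod : PySem.Int.mod p 2 = p % 2 := PySem.Int.mod_eq_emod_of_pos (by norm_num)
      have h1 : 0 ≤ p / 2 := by omega
      have h2 : p / 2 < (f : Int) := by
        simp only [Nat.cast_add, Nat.cast_one] at hlt; omega
      have hrec := ih (p / 2) t h1 h2
      rw [hstep, hfd, hmod]
      by_cases hodd : p % 2 = 0
      · rw [if_neg (by simp [hodd]), pvMatmulB_toM, hrec,
          show pvToM t ^ (p / 2).toNat * pvToM t ^ (p / 2).toNat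
            = pvToM t ^ ((p / 2).toNat + (p / 2).toNat) from (pow_add _ _ _).symm,
          show (p / 2).toNat + (p / 2).toNat = p.toNat from by omega]
      · rw [if_pos (by simp [hodd]), pvMatmulB_toM, pvMatmulB_toM, hrec,
          show pvToM t ^ (p / 2).toNat * pvToM t ^ (p / 2).toNat
            = pvToM t ^ ((p / 2).toNat + (p / 2).toNat) from (pow_add _ _ _).symm,
          ← pow_succ,
          show (p / 2).toNat + (p / 2).toNat + 1 = p.toNat from by omega]

theorem pvMatB_len (a : List Int) (e : List (List Int)) : (pvMatB a e).length = 10 := by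
  unfold pvMatB
  rw [pv_foldl_len _ _ (fun w x =>
      pv_foldl_len _ _ (fun w' x' => PySem.List.length_pySetD _ _ _) w), List.length_replicate]

theorem pvMatB_toV (a : List Int) (e : List (List Int)) (i : Fin 10) :
    pvToV (pvMatB a e) i = ∑ jj : Fin 10, pvToV a jj * pvToM e i jj := by
  have hnodup : ((PySem.List.pyRange 0 10).map Int.toNat).Nodup := by
    rw [pv_range10]; decide
  have hmem : ∀ x : Int, x ∈ PySem.List.pyRange 0 10 ↔ 0 ≤ x ∧ x < 10 := by
    intro x; exact PySem.List.mem_pyRange_one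
  have hi0 : (0 : Int) ≤ (i.val : Int) := by positivity
  have hi : ((i.val : Int)) < 10 := by exact_mod_cast i.isLt
  have hcells := pv_foldl_cells (0 : Int) (PySem.List.pyRange 0 10) Int.toNat
    (fun b ii =>
      (PySem.List.pyRange 0 10).foldl
        (fun b jj =>
          PySem.List.pySetD b ii
            (PySem.Int.mod (PySem.List.pyGetD b ii 0 + PySem.List.pyGetD a jj 0 * pvGet2 e ii jj)
              1000000007))
        b)
    (fun ii cell =>
      (PySem.List.pyRange 0 10).foldl
        (fun acc jj =>
          PySem.Int.mod (acc + PySem.List.pyGetD a jj 0 * pvGet2 e ii jj) 1000000007)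
        cell)
    (List.replicate 10 (0:Int)) hnodup (by
    intro w hw ii hii
    obtain ⟨hii0, hii10⟩ := (hmem ii).mp hii
    apply pv_foldl_cell (0 : Int) _ _ ii.toNat _ w (by rw [hw]; simp; omega)
    intro w' hw' jj hjj
    simp only [PySem.List.pySetD_of_nonneg _ _ hii0, PySem.List.pyGetD_of_nonneg _ _ hii0])
  have hcell := hcells.2 (i.val : Int) ((hmem _).mpr ⟨hi0, hi⟩) (by simp)
  have hcell0 : (List.replicate 10 (0:Int)).getD ((i.val : Int)).toNat 0 = 0 := by
    rw [List.getD_eq_getElem _ _ (by simp), List.getElem_replicate]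
  rw [hcell0] at hcell
  show ((PySem.List.pyGetD (pvMatB a e) (i.val : Int) 0 : Int) : ZMod 1000000007) = _
  rw [PySem.List.pyGetD_of_nonneg _ _ hi0]
  unfold pvMatB
  rw [hcell]
  rw [pv_cast_foldl_mod (PySem.List.pyRange 0 10)
      (fun jj => PySem.List.pyGetD a jj 0 * pvGet2 e (i.val : Int) jj) 0]
  simp only [Int.cast_zero, zero_add]
  rw [pv_sum_map_range10]
  refine Finset.sum_congr rfl (fun jj _ => ?_)
  simp only [pvToV, pvToM]
  push_cast
  ring

theorem pv_sum_cast (v : List Int) (hv : v.length = 10) :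
    ((v.sum : Int) : ZMod 1000000007) = ∑ i : Fin 10, pvToV v i := by
  have hgen : ∀ w : List Int, w.sum = ∑ q ∈ Finset.range w.length, w.getD q 0 := by
    intro w
    induction w with
    | nil => simp
    | cons x w ih =>
      rw [List.sum_cons, List.length_cons, Finset.sum_range_succ', ih]
      simp only [List.getD_cons_succ, List.getD_cons_zero]
      exact add_comm _ _
  rw [hgen, hv]
  push_cast
  rw [← Fin.sum_univ_eq_sum_range]
  refine Finset.sum_congr rfl (fun q _ => ?_)
  simp only [pvToV]
  rw [PySem.List.pyGetD_of_nonneg _ _ (by positivity)]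
  simp

theorem pv_mod_eq_of_cast {a b : Int}
    (h : (a : ZMod 1000000007) = (b : ZMod 1000000007)) :
    PySem.Int.mod a 1000000007 = PySem.Int.mod b 1000000007 := by
  rw [PySem.Int.mod_eq_emod_of_pos (by norm_num), PySem.Int.mod_eq_emod_of_pos (by norm_num)]
  have := (ZMod.intCast_eq_intCast_iff a b 1000000007).mp (by exact_mod_cast h)
  exact this

-- ===== VERDICT (by name: the statement is the Claim_ definition above) =====
theorem calculate_white_balls_after_levels_spec : Claim_equal_calculate_white_balls_after_levels := by
  intro n k m s hdom hpre
  obtain ⟨hm, -⟩ := hpre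
  show calculate_white_balls_after_levels n k m s = calculate_white_balls_after_levels_alt n k m s
  unfold calculate_white_balls_after_levels calculate_white_balls_after_levels_alt
  have hE : pvToM (pvPowLoop (m.toNat + 1) m pvMatE (pvMatC k))
      = pvToM (pvTrans k) ^ m.toNat := by
    rw [pvPowLoop_toM _ m _ _ hm (by push_cast; omega), pvToM_matE, one_mul,
      pvToM_matC_eq_trans]
  have hP : pvToM (pvMatpowB (pvTrans k) (m.toNat + 1) m) = pvToM (pvTrans k) ^ m.toNat :=
    pvMatpowB_toM _ m _ hm (by push_cast; omega)
  apply pv_mod_eq_of_cast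
  rw [pv_sum_cast _ (pvMatB_len _ _)]
  rw [Int.cast_list_sum, List.map_map,
    show (Int.cast ∘ fun i =>
        ((PySem.List.pyRange 0 10).map
          (fun j => pvGet2 (pvMatpowB (pvTrans k) (m.toNat + 1) m) i j
            * PySem.List.pyGetD (pvCount s) j 0)).sum)
      = (fun i => ((((PySem.List.pyRange 0 10).map
          (fun j => pvGet2 (pvMatpowB (pvTrans k) (m.toNat + 1) m) i j
            * PySem.List.pyGetD (pvCount s) j 0)).sum : Int) : ZMod 1000000007)) from rfl,
    pv_sum_map_range10]
  refine Finset.sum_congr rfl (fun i _ => ?_)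
  rw [pvMatB_toV, hE]
  rw [Int.cast_list_sum, List.map_map,
    show (Int.cast ∘ fun j => pvGet2 (pvMatpowB (pvTrans k) (m.toNat + 1) m) (i.val : Int) j
        * PySem.List.pyGetD (pvCount s) j 0)
      = (fun j => ((pvGet2 (pvMatpowB (pvTrans k) (m.toNat + 1) m) (i.val : Int) j
          * PySem.List.pyGetD (pvCount s) j 0 : Int) : ZMod 1000000007)) from rfl,
    pv_sum_map_range10]
  refine Finset.sum_congr rfl (fun j _ => ?_)
  have := congrFun (congrFun hP i) j
  simp only [pvToM] at this
  simp only [pvToV]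
  push_cast
  rw [this]
  ring
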